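-- pv_equiv track=rewrite | github.com/SiyuanLIU739/MyCodeBook | LeetCode/Python/Q1105.py | minHeightShelves
-- ===== SOURCE A (Python) =====
-- from typing import List
--
-- def minHeightShelves(books: List[List[int]], shelfWidth: int) -> int:
--     books.insert(0, [0, 0])
--
--     f = [1000 * 1000 * 2] * len(books)
--     f[0] = 0
--
--     for i in range(1, len(books)):
--         width = 0
--         maxheight = 0
--         for j in range(1, len(books)):
--             lst = i - j
--             if(lst < 0):
--                 break
--
--             maxheight = max(maxheight, books[lst + 1][1])
--             width += books[lst + 1][0]
--             if(width > shelfWidth):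
--                 break
--
--             f[i] = min(f[i], f[lst] + maxheight)
--
--     return f[-1]
-- ===== SOURCE B (Python) =====
-- from typing import List
--
-- def minHeightShelves(books: List[List[int]], shelfWidth: int) -> int:
--     # top-down memoized recursion over prefixes (A tabulates bottom-up);
--     # keep A's in-place sentinel insertion so the caller-visible mutation matches
--     books.insert(0, [0, 0])
--     memo = {}
--
--     def dp(i):
--         # minimum total height achievable for books[1..i] (0 = empty prefix)
--         if i == 0:
--             return 0
--         if i in memo:
--             return memo[i]
--         best = 1000 * 1000 * 2
--         width = 0
--         maxheight = 0
--         lst = i - 1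
--         while lst >= 0:
--             maxheight = max(maxheight, books[lst + 1][1])
--             width += books[lst + 1][0]
--             if width > shelfWidth:
--                 break
--             best = min(best, dp(lst) + maxheight)
--             lst -= 1
--         memo[i] = best
--         return best
--
--     return dp(len(books) - 1)
-- ===== Notes on version B (the rewrite author's own statement) =====
-- stated objective: alternative
-- what changed: Replaces A's bottom-up tabulation (an f-array filled for every prefix in index order) by a top-down memoized recursion dp(i) over the same prefixes with a dict memo, keeping A's in-place books.insert(0,[0,0]) mutation and exact return values.
import Mathlib
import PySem

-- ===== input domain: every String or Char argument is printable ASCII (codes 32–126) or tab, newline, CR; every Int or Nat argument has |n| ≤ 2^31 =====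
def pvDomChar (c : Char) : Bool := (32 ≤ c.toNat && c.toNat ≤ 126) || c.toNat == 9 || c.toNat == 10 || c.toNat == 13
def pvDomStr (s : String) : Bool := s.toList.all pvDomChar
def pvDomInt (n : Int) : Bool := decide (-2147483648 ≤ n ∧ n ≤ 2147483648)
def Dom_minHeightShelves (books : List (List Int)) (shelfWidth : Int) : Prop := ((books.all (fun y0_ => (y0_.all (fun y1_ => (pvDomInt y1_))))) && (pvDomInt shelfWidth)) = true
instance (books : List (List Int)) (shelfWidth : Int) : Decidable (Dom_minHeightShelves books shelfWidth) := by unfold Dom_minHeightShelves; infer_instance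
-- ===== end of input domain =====

-- B replaces A's bottom-up table over prefixes by a top-down memoized recursion over
-- the same prefixes (objective: alternative decomposition, same asymptotic cost).
-- Both A and B mutate the argument in place (books.insert(0, [0, 0])); the theorems
-- below are about the RETURN value only, and both programs perform the same mutation.

-- ===== PORT A =====
-- books[k][c]; exact on Pre_ (every access made by either program is in range there)
def pvBook (bs : List (List Int)) (k c : Nat) : Int := (bs.getD k []).getD c 0

-- inner `for j in range(1, len(books))` loop of A, with its two breaks
def pvAInner (bs : List (List Int)) (W : Int) (i : Nat) (js : List Nat)
    (width maxheight : Int) (f : List Int) : List Int :=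
  match js with
  | [] => f
  | j :: rest =>
    if i < j then f           -- lst = i - j < 0 → break
    else
      let lst := i - j
      let maxheight := max maxheight (pvBook bs (lst + 1) 1)
      let width := width + pvBook bs (lst + 1) 0
      if W < width then f     -- width > shelfWidth → break
      else pvAInner bs W i rest width maxheight
             (f.set i (min (f.getD i 0) (f.getD lst 0 + maxheight)))

def minHeightShelves (books : List (List Int)) (shelfWidth : Int) : Int :=
  let books2 := ([0, 0] : List Int) :: books          -- books.insert(0, [0, 0])
  let n := books2.length
  let f0 := (List.replicate n (2000000 : Int)).set 0 0
  let f := (List.range' 1 (n - 1)).foldl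
      (fun f i => pvAInner books2 shelfWidth i (List.range' 1 (n - 1)) 0 0 f) f0
  (PySem.List.pyGet? f (-1)).getD 0                   -- f[-1]; f is nonempty

-- ===== PORT B =====
-- top-down memoized recursion: pvDp i = dp(i), memo threaded as an association list
mutual
def pvDp (bs : List (List Int)) (W : Int) (i : Nat) (m : List (Nat × Int)) :
    Int × List (Nat × Int) :=
  if h : i = 0 then (0, m)
  else
    match m.lookup i with
    | some v => (v, m)
    | none =>
      let r := pvDpGo bs W (i - 1) 0 0 2000000 m
      (r.1, (i, r.1) :: r.2)
termination_by 2 * i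

-- the `while lst >= 0` loop of dp, lst counting down
def pvDpGo (bs : List (List Int)) (W : Int) (lst : Nat)
    (width maxheight best : Int) (m : List (Nat × Int)) : Int × List (Nat × Int) :=
  let maxheight := max maxheight (pvBook bs (lst + 1) 1)
  let width := width + pvBook bs (lst + 1) 0
  if W < width then (best, m)
  else
    let r := pvDp bs W lst m
    let best := min best (r.1 + maxheight)
    match lst with
    | 0 => (best, r.2)
    | l + 1 => pvDpGo bs W l width maxheight best r.2
termination_by 2 * lst + 1
end

def minHeightShelves_alt (books : List (List Int)) (shelfWidth : Int) : Int :=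
  let books2 := ([0, 0] : List Int) :: books          -- books.insert(0, [0, 0])
  (pvDp books2 shelfWidth (books2.length - 1) []).1

-- ===== PRECONDITION & SPEC =====
-- Pre_ excludes exactly the inputs where Python A raises IndexError: some book with
-- fewer than two entries (A reads books[k][0] and books[k][1] for every book).
def Pre_minHeightShelves (books : List (List Int)) (shelfWidth : Int) : Prop :=
  ∀ b ∈ books, 2 ≤ b.length
instance (books : List (List Int)) (shelfWidth : Int) : Decidable (Pre_minHeightShelves books shelfWidth) := by unfold Pre_minHeightShelves; infer_instance

def pvWitness_minHeightShelves : List (List Int) × Int := ([[1, 3], [2, 4], [3, 2]], 6)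

def Spec_minHeightShelves (books : List (List Int)) (shelfWidth : Int) (out : Int) : Prop := out = minHeightShelves_alt books shelfWidth
instance (books : List (List Int)) (shelfWidth : Int) (out : Int) : Decidable (Spec_minHeightShelves books shelfWidth out) := by unfold Spec_minHeightShelves; infer_instance

-- ===== CLAIM (what is proved, stated in full; the proofs are below) =====
def Claim_equal_minHeightShelves : Prop := ∀ (books : List (List Int)) (shelfWidth : Int), Dom_minHeightShelves books shelfWidth → Pre_minHeightShelves books shelfWidth → Spec_minHeightShelves books shelfWidth (minHeightShelves books shelfWidth)

-- ===== LEMMAS AND PROOFS =====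

-- reference value: pvF bs W i = the common dp value for the prefix of i real books
mutual
def pvF (bs : List (List Int)) (W : Int) (i : Nat) : Int :=
  if i = 0 then 0 else pvFGo bs W (i - 1) 0 0 2000000
termination_by 2 * i

def pvFGo (bs : List (List Int)) (W : Int) (lst : Nat)
    (width maxheight best : Int) : Int :=
  let maxheight := max maxheight (pvBook bs (lst + 1) 1)
  let width := width + pvBook bs (lst + 1) 0
  if W < width then best
  else
    let best := min best (pvF bs W lst + maxheight)
    match lst with
    | 0 => best
    | l + 1 => pvFGo bs W l width maxheight best
termination_by 2 * lst + 1
end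

-- ---- B side: the memo invariant and correctness of pvDp ----

def pvInv (bs : List (List Int)) (W : Int) (m : List (Nat × Int)) : Prop :=
  ∀ k v, m.lookup k = some v → v = pvF bs W k

theorem pvInv_nil (bs : List (List Int)) (W : Int) : pvInv bs W [] := by
  intro k v h; simp [List.lookup] at h

theorem pvDpGo_correct (bs : List (List Int)) (W : Int) (lst : Nat)
    (ih : ∀ k, k ≤ lst → ∀ m, pvInv bs W m →
        (pvDp bs W k m).1 = pvF bs W k ∧ pvInv bs W (pvDp bs W k m).2) :
    ∀ (width maxheight best : Int) (m : List (Nat × Int)), pvInv bs W m →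
      (pvDpGo bs W lst width maxheight best m).1 = pvFGo bs W lst width maxheight best ∧
      pvInv bs W (pvDpGo bs W lst width maxheight best m).2 := by
  induction lst with
  | zero =>
    intro width maxheight best m hm
    rw [pvDpGo, pvFGo]
    simp only
    split
    · exact ⟨rfl, hm⟩
    · have h := ih 0 (by omega) m hm
      rw [← h.1]
      exact ⟨rfl, (h.2 : _)⟩
  | succ l ihl =>
    intro width maxheight best m hm
    rw [pvDpGo, pvFGo]
    simp only
    split
    · exact ⟨rfl, hm⟩
    · have h := ih (l + 1) (by omega) m hm
      have ihl' := ihl (fun k hk m' hm' => ih k (by omega) m' hm')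
      have h2 := ihl' (width + pvBook bs (l + 1 + 1) 0)
        (max maxheight (pvBook bs (l + 1 + 1) 1))
        (min best ((pvDp bs W (l + 1) m).1 + max maxheight (pvBook bs (l + 1 + 1) 1)))
        (pvDp bs W (l + 1) m).2 h.2
      rw [← h.1]
      exact h2

theorem pvDp_correct (bs : List (List Int)) (W : Int) :
    ∀ (i : Nat) (m : List (Nat × Int)), pvInv bs W m →
      (pvDp bs W i m).1 = pvF bs W i ∧ pvInv bs W (pvDp bs W i m).2 := by
  intro i
  induction i using Nat.strong_induction_on with
  | _ i ihs =>
    intro m hm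
    rw [pvDp]
    by_cases h : i = 0
    · subst h; simp [pvF]; exact hm
    · simp only [dif_neg h]
      cases hl : m.lookup i with
      | some v =>
        simp only
        exact ⟨hm i v hl, hm⟩
      | none =>
        simp only
        have hgo := pvDpGo_correct bs W (i - 1)
          (fun k hk m' hm' => ihs k (by omega) m' hm') 0 0 2000000 m hm
        constructor
        · rw [hgo.1, pvF, if_neg h]
        · intro k v hkv
          simp only [List.lookup] at hkv
          by_cases hki : k = i
          · subst hki
            simp at hkv
            rw [← hkv, hgo.1, pvF, if_neg h]
          · have : (k == i) = false := by simp [hki]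
            rw [this] at hkv
            exact hgo.2 k v hkv

theorem alt_eq_pvF (books : List (List Int)) (W : Int) :
    minHeightShelves_alt books W
      = pvF (([0, 0] : List Int) :: books) W books.length := by
  unfold minHeightShelves_alt
  simp only [List.length_cons, Nat.add_sub_cancel]
  exact (pvDp_correct _ W books.length [] (pvInv_nil _ W)).1

-- ---- A side: the table computes pvF ----

theorem getD_set_self (l : List Int) (i : Nat) (x : Int) (h : i < l.length) :
    (l.set i x).getD i 0 = x := by
  simp [List.getD_eq_getElem?_getD, List.getElem?_set_self, h]

theorem getD_set_ne (l : List Int) (i k : Nat) (x : Int) (h : i ≠ k) :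
    (l.set i x).getD k 0 = l.getD k 0 := by
  simp [List.getD_eq_getElem?_getD, List.getElem?_set_ne h]

theorem set_getD_self (l : List Int) (i : Nat) (h : i < l.length) :
    l.set i (l.getD i 0) = l := by
  apply List.ext_getElem
  · simp
  · intro k h1 h2
    by_cases hk : i = k
    · subst hk; simp [List.getElem_set_self, List.getD_eq_getElem?_getD,
        List.getElem?_eq_getElem (by simpa using h1 : i < l.length)]
    · simp [List.getElem_set_ne hk]

-- past the sentinel break: all remaining j exceed i
theorem pvAInner_stop (bs : List (List Int)) (W : Int) (i : Nat)
    (e : Nat) (width maxheight : Int) (f : List Int) :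
    pvAInner bs W i (List.range' (i + 1) e) width maxheight f = f := by
  cases e with
  | zero => rfl
  | succ e' => rw [List.range'_succ, pvAInner]; simp

theorem pvAInner_eq (bs : List (List Int)) (W : Int) (i : Nat) :
    ∀ (lst e : Nat) (width maxheight : Int) (f : List Int),
      lst < i → i < f.length →
      (∀ k, k ≤ lst → f.getD k 0 = pvF bs W k) →
      pvAInner bs W i (List.range' (i - lst) (lst + 1 + e)) width maxheight f
        = f.set i (pvFGo bs W lst width maxheight (f.getD i 0)) := by
  intro lst
  induction lst with
  | zero =>
    intro e width maxheight f hlt hf hk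
    have hc : (0 : Nat) + 1 + e = e + 1 := by omega
    rw [hc, List.range'_succ, pvAInner]
    rw [if_neg (by omega : ¬ i < i - 0)]
    have hidx : i - (i - 0) = 0 := by omega
    rw [hidx, pvFGo]
    simp only
    split
    · exact (set_getD_self f i hf).symm
    · have harr : i - 0 + 1 = i + 1 := by omega
      rw [harr, pvAInner_stop, hk 0 (by omega)]
  | succ l ihl =>
    intro e width maxheight f hlt hf hk
    have hc : (l + 1) + 1 + e = (l + 1 + e) + 1 := by omega
    rw [hc, List.range'_succ, pvAInner]
    rw [if_neg (by omega : ¬ i < i - (l + 1))]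
    have hidx : i - (i - (l + 1)) = l + 1 := by omega
    rw [hidx, pvFGo]
    simp only
    split
    · exact (set_getD_self f i hf).symm
    · have hnext : i - (l + 1) + 1 = i - l := by omega
      rw [hnext]
      have hrec := ihl e
        (width + pvBook bs (l + 1 + 1) 0)
        (max maxheight (pvBook bs (l + 1 + 1) 1))
        (f.set i (min (f.getD i 0) (f.getD (l + 1) 0 + max maxheight (pvBook bs (l + 1 + 1) 1))))
        (by omega) (by simpa using hf)
        (fun k hkl => by
          rw [getD_set_ne _ i k _ (by omega)]
          exact hk k (by omega))
      rw [hrec, List.set_set]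
      congr 1
      rw [getD_set_self f i _ hf, hk (l + 1) (le_refl _)]

theorem pvOuter (bs : List (List Int)) (W : Int) (n : Nat) (hn : n = bs.length) :
    ∀ (c t : Nat) (f : List Int), 1 ≤ t → t + c ≤ n →
      f.length = n →
      (∀ k, k < t → f.getD k 0 = pvF bs W k) →
      (∀ k, t ≤ k → k < n → f.getD k 0 = 2000000) →
      let g := (List.range' t c).foldl
          (fun f i => pvAInner bs W i (List.range' 1 (n - 1)) 0 0 f) f
      g.length = n ∧ (∀ k, k < t + c → g.getD k 0 = pvF bs W k) ∧
        (∀ k, t + c ≤ k → k < n → g.getD k 0 = 2000000) := by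
  intro c
  induction c with
  | zero =>
    intro t f h1 h2 h3 h4 h5
    exact ⟨h3, fun k hk => h4 k (by omega), fun k hk hk2 => h5 k (by omega) hk2⟩
  | succ c' ihc =>
    intro t f h1 h2 h3 h4 h5
    rw [List.range'_succ]
    simp only [List.foldl_cons]
    have hrange : List.range' 1 (n - 1) = List.range' (t - (t - 1)) ((t - 1) + 1 + (n - 1 - t)) := by
      congr 1 <;> omega
    have hstep : pvAInner bs W t (List.range' 1 (n - 1)) 0 0 f
        = f.set t (pvF bs W t) := by
      rw [hrange]
      rw [pvAInner_eq bs W t (t - 1) (n - 1 - t) 0 0 f (by omega) (by omega)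
        (fun k hkl => h4 k (by omega))]
      rw [h5 t (le_refl t) (by omega)]
      congr 1
      rw [pvF, if_neg (by omega)]
    rw [hstep]
    have := ihc (t + 1) (f.set t (pvF bs W t)) (by omega) (by omega)
      (by simp [h3])
      (fun k hk => by
        by_cases hkt : k = t
        · subst hkt; exact getD_set_self f k _ (by omega)
        · rw [getD_set_ne _ t k _ (by omega)]; exact h4 k (by omega))
      (fun k hk hk2 => by
        rw [getD_set_ne _ t k _ (by omega)]; exact h5 k (by omega) hk2)
    refine ⟨this.1, fun k hk => this.2.1 k (by omega),
      fun k hk hk2 => this.2.2 k (by omega) hk2⟩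

theorem a_eq_pvF (books : List (List Int)) (W : Int) :
    minHeightShelves books W
      = pvF (([0, 0] : List Int) :: books) W books.length := by
  unfold minHeightShelves
  simp only [List.length_cons]
  set bs := ([0, 0] : List Int) :: books with hbs
  set n := books.length + 1 with hn
  have hf0len : ((List.replicate n (2000000 : Int)).set 0 0).length = n := by simp
  have hout := pvOuter bs W n (by simp [hbs, hn]) (n - 1) 1
    ((List.replicate n (2000000 : Int)).set 0 0)
    (le_refl 1) (by omega) hf0len
    (fun k hk => by
      interval_cases k
      rw [getD_set_self _ 0 _ (by simp [hn]), pvF]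
      rfl)
    (fun k hk hk2 => by
      rw [getD_set_ne _ 0 k _ (by omega)]
      simp [List.getD_eq_getElem?_getD, List.getElem?_replicate, hk2])
  set g := (List.range' 1 (n - 1)).foldl
      (fun f i => pvAInner bs W i (List.range' 1 (n - 1)) 0 0 f)
      ((List.replicate n (2000000 : Int)).set 0 0) with hg
  have hglen : g.length = n := hout.1
  have hgval : g.getD (n - 1) 0 = pvF bs W (n - 1) := hout.2.1 (n - 1) (by omega)
  have hne : g ≠ [] := by
    intro hnil; rw [hnil] at hglen; simp [hn] at hglen
  have hlast : (PySem.List.pyGet? g (-1)).getD 0 = g.getD (n - 1) 0 := by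
    rw [PySem.List.pyGet?_neg_one, List.getLast?_eq_getElem?]
    simp [List.getD_eq_getElem?_getD, hglen]
  rw [hlast, hgval, show n - 1 = books.length from by omega]

-- ===== VERDICT (by name: the statement is the Claim_ definition above) =====
theorem minHeightShelves_spec : Claim_equal_minHeightShelves := by
  intro books shelfWidth _ _
  unfold Spec_minHeightShelves
  rw [a_eq_pvF, alt_eq_pvF]
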